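-- pv_equiv track=rewrite | github.com/sobrinhocdg/devil-heroin | midi_generator.py | build_progression
-- ===== SOURCE A (Python) =====
-- def build_progression(scale, length):
--     root = scale[0]
--     chord_pattern = [0, 4, 5, 3, 1]
--     progression = []
--     for i in range(length):
--         idx = chord_pattern[i % len(chord_pattern)]
--         chord_root = scale[idx % len(scale)]
--         progression.append(chord_root)
--     return progression
-- ===== SOURCE B (Python) =====
-- def build_progression(scale, length):
--     if length <= 0:
--         return []
--     block = [scale[p % len(scale)] for p in (0, 4, 5, 3, 1)]
--     q, r = divmod(length, 5)
--     return block * q + block[:r]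
-- ===== Notes on version B (the rewrite author's own statement) =====
-- stated objective: alternative
-- what changed: B replaces A's per-iteration two-level modular indexing loop with block arithmetic: it builds the 5-note chord block once, then produces the output as q whole copies of the block plus a prefix of r notes, where q, r = divmod(length, 5) -- no per-element modulo or index lookup remains.
import Mathlib
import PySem

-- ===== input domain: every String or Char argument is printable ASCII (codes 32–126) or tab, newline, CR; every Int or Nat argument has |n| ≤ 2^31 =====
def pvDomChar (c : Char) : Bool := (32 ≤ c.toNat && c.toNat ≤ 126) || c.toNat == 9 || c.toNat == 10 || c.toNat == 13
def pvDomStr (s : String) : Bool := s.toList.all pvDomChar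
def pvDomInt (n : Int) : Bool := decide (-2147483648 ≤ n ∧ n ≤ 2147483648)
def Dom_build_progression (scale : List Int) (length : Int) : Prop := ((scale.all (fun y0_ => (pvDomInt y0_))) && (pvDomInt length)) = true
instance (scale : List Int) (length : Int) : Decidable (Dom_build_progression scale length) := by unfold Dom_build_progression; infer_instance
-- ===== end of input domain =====

-- B builds the 5-note chord block once and returns q whole copies plus an r-note prefix
-- (q, r = divmod(length, 5)), replacing A's per-iteration modular-indexing loop (objective: alternative).

-- ===== PORT A =====
def build_progression (scale : List Int) (length : Int) : List Int :=
  match PySem.List.pyGet? scale 0 with   -- root = scale[0]; none = IndexError, excluded by Pre_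
  | none => []
  | some _root =>
    let chord_pattern : List Int := [0, 4, 5, 3, 1]
    (PySem.List.pyRange 0 length 1).foldl
      (fun progression i =>
        let idx := PySem.List.pyGetD chord_pattern (PySem.Int.mod i (chord_pattern.length : Int)) 0
        let chord_root := PySem.List.pyGetD scale (PySem.Int.mod idx (scale.length : Int)) 0
        progression ++ [chord_root]) []

-- ===== PORT B =====
def build_progression_alt (scale : List Int) (length : Int) : List Int :=
  if length ≤ 0 then []
  else
    let block := ([0, 4, 5, 3, 1] : List Int).map
      (fun p => PySem.List.pyGetD scale (PySem.Int.mod p (scale.length : Int)) 0)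
    let q := PySem.Int.floordiv length 5
    let r := PySem.Int.mod length 5
    PySem.List.pyRepeat block q ++ PySem.List.slice block none (some r)

-- ===== PRECONDITION & SPEC =====
-- Pre_ excludes the empty scale, on which Python A raises IndexError at scale[0]
-- (and B raises ZeroDivisionError when length > 0).
def Pre_build_progression (scale : List Int) (_length : Int) : Prop := scale ≠ []
instance (scale : List Int) (length : Int) : Decidable (Pre_build_progression scale length) := by unfold Pre_build_progression; infer_instance
def pvWitness_build_progression : List Int × Int := ([60, 62, 64, 65, 67, 69, 71], 8)

def Spec_build_progression (scale : List Int) (length : Int) (out : List Int) : Prop := out = build_progression_alt scale length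
instance (scale : List Int) (length : Int) (out : List Int) : Decidable (Spec_build_progression scale length out) := by unfold Spec_build_progression; infer_instance

-- ===== CLAIM (what is proved, stated in full; the proofs are below) =====
def Claim_equal_build_progression : Prop := ∀ (scale : List Int) (length : Int), Dom_build_progression scale length → Pre_build_progression scale length → Spec_build_progression scale length (build_progression scale length)

-- ===== LEMMAS AND PROOFS =====

-- A's per-index computation equals indexing the precomputed block at i mod 5.
lemma step_eq (scale : List Int) (i : Int) :
    PySem.List.pyGetD scale
      (PySem.Int.mod (PySem.List.pyGetD ([0, 4, 5, 3, 1] : List Int)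
        (PySem.Int.mod i (5 : Int)) 0) (scale.length : Int)) 0 =
    PySem.List.pyGetD
      (([0, 4, 5, 3, 1] : List Int).map
        (fun p => PySem.List.pyGetD scale (PySem.Int.mod p (scale.length : Int)) 0))
      (PySem.Int.mod i 5) 0 := by
  have h0 : (0:Int) ≤ PySem.Int.mod i 5 := PySem.Int.mod_nonneg i (by norm_num)
  have h5 : PySem.Int.mod i 5 < 5 := PySem.Int.mod_lt i (by norm_num)
  interval_cases (PySem.Int.mod i 5) <;>
    simp [PySem.List.pyGetD, PySem.List.pyGet?, PySem.List.pyIdx?]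

-- Cycling over a 5-element block for 5*q + r steps is q whole copies plus an r-prefix.
lemma cycle_eq_blocks (block : List Int) (hb : block.length = 5) (q r : Nat) (hr : r < 5) :
    (List.range (5 * q + r)).map (fun k => block.getD (k % 5) 0) =
      (List.replicate q block).flatten ++ block.take r := by
  induction q with
  | zero =>
    obtain ⟨a, b, c, d, e, h⟩ : ∃ a b c d e, block = [a, b, c, d, e] := by
      match block, hb with
      | [a, b, c, d, e], _ => exact ⟨a, b, c, d, e, rfl⟩
    subst h
    interval_cases r <;> simp [List.range_succ]
  | succ q ih =>
    have : 5 * (q + 1) + r = 5 + (5 * q + r) := by ring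
    rw [this, List.range_add, List.map_append, List.map_map]
    have h2 : ((List.range (5 * q + r)).map ((fun k => block.getD (k % 5) 0) ∘ (fun k => 5 + k)))
        = (List.range (5 * q + r)).map (fun k => block.getD (k % 5) 0) := by
      refine List.map_congr_left fun k _ => ?_
      simp [Nat.add_mod_left]
    rw [h2, ih]
    obtain ⟨a, b, c, d, e, h⟩ : ∃ a b c d e, block = [a, b, c, d, e] := by
      match block, hb with
      | [a, b, c, d, e], _ => exact ⟨a, b, c, d, e, rfl⟩
    subst h
    simp [List.range_succ, List.replicate_succ]

-- ===== VERDICT (by name: the statement is the Claim_ definition above) =====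
theorem build_progression_spec : Claim_equal_build_progression := by
  intro scale length _ hpre
  unfold Spec_build_progression build_progression build_progression_alt
  obtain ⟨a, rest, rfl⟩ : ∃ a rest, scale = a :: rest := by
    cases scale with
    | nil => exact absurd rfl hpre
    | cons a rest => exact ⟨a, rest, rfl⟩
  have hget : PySem.List.pyGet? (a :: rest) 0 = some a := by
    simp [PySem.List.pyGet?, PySem.List.pyIdx?]
  rw [hget, PySem.List.foldl_append_singleton_eq_map]
  simp only [List.nil_append]
  by_cases hle : length ≤ 0
  · rw [if_pos hle, PySem.List.pyRange_one_eq_nil hle, List.map_nil]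
  · rw [if_neg hle]
    push Not at hle
    obtain ⟨n, rfl⟩ : ∃ n : Nat, length = (n : Int) :=
      ⟨length.toNat, (Int.toNat_of_nonneg hle.le).symm⟩
    set block := (([0, 4, 5, 3, 1] : List Int).map
      (fun p => PySem.List.pyGetD (a :: rest) (PySem.Int.mod p ((a :: rest).length : Int)) 0))
      with hblock
    have hbl : block.length = 5 := by simp [hblock]
    -- A side: reduce to Nat-indexed cycling over the block
    have hA : (PySem.List.pyRange 0 (n : Int) 1).map
        (fun i =>
          PySem.List.pyGetD (a :: rest)
            (PySem.Int.mod (PySem.List.pyGetD ([0, 4, 5, 3, 1] : List Int)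
              (PySem.Int.mod i ((5 : Nat) : Int)) 0) (((a :: rest).length : Nat) : Int)) 0)
        = (List.range n).map (fun k => block.getD (k % 5) 0) := by
      rw [PySem.List.pyRange_one]
      simp only [Int.sub_zero, Int.toNat_natCast, List.map_map]
      refine List.map_congr_left fun k _ => ?_
      simp only [Function.comp, Int.zero_add]
      have h5c : (((5 : Nat) : Int)) = (5 : Int) := by norm_cast
      rw [h5c, step_eq (a :: rest) (k : Int)]
      have hm : PySem.Int.mod (k : Int) 5 = ((k % 5 : Nat) : Int) := by
        exact_mod_cast PySem.Int.mod_natCast k 5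
      rw [hm, ← hblock, PySem.List.pyGetD_natCast]
    -- B side arithmetic
    have hq : PySem.Int.floordiv (n : Int) 5 = ((n / 5 : Nat) : Int) := by
      exact_mod_cast PySem.Int.floordiv_natCast n 5
    have hr : PySem.Int.mod (n : Int) 5 = ((n % 5 : Nat) : Int) := by
      exact_mod_cast PySem.Int.mod_natCast n 5
    have hsplit : n = 5 * (n / 5) + n % 5 := (Nat.div_add_mod' n 5).symm ▸ by omega
    calc (PySem.List.pyRange 0 (n : Int) 1).map _
        = (List.range n).map (fun k => block.getD (k % 5) 0) := by
          exact hA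
      _ = (List.replicate (n / 5) block).flatten ++ block.take (n % 5) := by
          conv_lhs => rw [hsplit]
          exact cycle_eq_blocks block hbl (n / 5) (n % 5) (Nat.mod_lt n (by norm_num))
      _ = PySem.List.pyRepeat block ((n / 5 : Nat) : Int) ++
            PySem.List.slice block none (some ((n % 5 : Nat) : Int)) := by
          rw [PySem.List.slice_to_natCast]
          simp only [PySem.List.pyRepeat, Int.toNat_natCast]
    rw [hq, hr]
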